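-- pv_equiv track=rewrite | github.com/YudaDeltaEDGE/smartflow_radar | steps/B_roi/service.py | _grid_bounds
-- ===== SOURCE A (Python) =====
-- from typing import List, Tuple, Optional
--
-- def _grid_bounds(total: int, parts: int) -> List[Tuple[int, int]]:
--     base = total // parts
--     bounds: List[Tuple[int, int]] = []
--     start = 0
--     for i in range(parts):
--         end = start + base
--         if i == parts - 1:
--             end = total
--         bounds.append((start, end))
--         start = end
--     return bounds
-- ===== SOURCE B (Python) =====
-- from typing import List, Tuple
--
-- def _grid_bounds(total: int, parts: int) -> List[Tuple[int, int]]: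
--     base = total // parts
--
--     def build(i: int, j: int) -> List[Tuple[int, int]]:
--         # buckets with indices i..j-1, by binary splitting
--         if j <= i:
--             return []
--         if j - i == 1:
--             return [(i * base, total if i == parts - 1 else (i + 1) * base)]
--         m = (i + j) // 2
--         return build(i, m) + build(m, j)
--
--     return build(0, parts)
-- ===== Notes on version B (the rewrite author's own statement) =====
-- stated objective: alternative
-- what changed: B computes each bucket from its index alone (i*base, (i+1)*base or total) and assembles the list by divide-and-conquer binary splitting of the index range, instead of A's linear loop threading a running start accumulator.
import Mathlib
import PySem

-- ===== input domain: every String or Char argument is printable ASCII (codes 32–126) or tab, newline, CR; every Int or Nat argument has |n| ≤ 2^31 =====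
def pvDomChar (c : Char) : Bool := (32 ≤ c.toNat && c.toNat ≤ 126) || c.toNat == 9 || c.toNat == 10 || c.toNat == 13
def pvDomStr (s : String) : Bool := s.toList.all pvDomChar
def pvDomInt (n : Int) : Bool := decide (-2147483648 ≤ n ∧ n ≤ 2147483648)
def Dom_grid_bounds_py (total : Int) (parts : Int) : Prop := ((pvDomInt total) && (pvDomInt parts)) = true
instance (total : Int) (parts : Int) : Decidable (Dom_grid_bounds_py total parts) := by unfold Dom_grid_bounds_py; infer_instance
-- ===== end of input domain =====

-- B computes each bucket directly from its index and assembles the list by divide-and-conquer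
-- binary splitting of the index range, instead of A's linear loop with a running start (objective: alternative).

-- ===== PORT A =====
def grid_bounds_py (total : Int) (parts : Int) : List (Int × Int) :=
  let base := PySem.Int.floordiv total parts
  let st := (PySem.List.pyRange 0 parts 1).foldl
    (fun (s : List (Int × Int) × Int) i =>
      let e := s.2 + base
      let e := if i = parts - 1 then total else e
      (s.1 ++ [(s.2, e)], e)) ([], 0)
  st.1

-- ===== PORT B =====
-- midpoint bounds used by gridBuild's termination proof (port must cite it by name)
theorem gridMid_bounds (i j : Int) (h : i + 2 ≤ j) :
    i < PySem.Int.floordiv (i + j) 2 ∧ PySem.Int.floordiv (i + j) 2 < j := by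
  have hb := PySem.Int.floordiv_two_mid_bounds (lo := i + 1) (hi := j - 1) (by omega)
  have he : (i + 1) + (j - 1) = i + j := by ring
  rw [he] at hb
  omega

-- the inner recursive helper 'build' of Source B
def gridBuild (total : Int) (parts : Int) (base : Int) (i j : Int) : List (Int × Int) :=
  if _h1 : j ≤ i then []
  else if _h2 : j - i = 1 then
    [(i * base, if i = parts - 1 then total else (i + 1) * base)]
  else
    -- m = (i + j) // 2 inlined
    gridBuild total parts base i (PySem.Int.floordiv (i + j) 2) ++
      gridBuild total parts base (PySem.Int.floordiv (i + j) 2) j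
termination_by (j - i).toNat
decreasing_by
  · have := gridMid_bounds i j (by omega)
    omega
  · have := gridMid_bounds i j (by omega)
    omega

def grid_bounds_py_alt (total : Int) (parts : Int) : List (Int × Int) :=
  let base := PySem.Int.floordiv total parts
  gridBuild total parts base 0 parts

-- ===== PRECONDITION & SPEC =====
-- Pre_ excludes exactly parts = 0, where Python's total // parts raises ZeroDivisionError (in A and in B alike).
def Pre_grid_bounds_py (total : Int) (parts : Int) : Prop := parts ≠ 0
instance (total : Int) (parts : Int) : Decidable (Pre_grid_bounds_py total parts) := by unfold Pre_grid_bounds_py; infer_instance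
def pvWitness_grid_bounds_py : Int × Int := (10, 3)
def Spec_grid_bounds_py (total : Int) (parts : Int) (out : List (Int × Int)) : Prop := out = grid_bounds_py_alt total parts
instance (total : Int) (parts : Int) (out : List (Int × Int)) : Decidable (Spec_grid_bounds_py total parts out) := by unfold Spec_grid_bounds_py; infer_instance

-- ===== CLAIM (what is proved, stated in full; the proofs are below) =====
def Claim_equal_grid_bounds_py : Prop := ∀ (total : Int) (parts : Int), Dom_grid_bounds_py total parts → Pre_grid_bounds_py total parts → Spec_grid_bounds_py total parts (grid_bounds_py total parts)

-- ===== LEMMAS AND PROOFS =====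

-- The canonical bucket at index k.
def gridBucket (total parts base : Int) (k : Int) : Int × Int :=
  (k * base, if k = parts - 1 then total else (k + 1) * base)

-- B: the divide-and-conquer build yields the bucket of every index in [i, j).
theorem gridBuild_eq_map (total parts base : Int) : ∀ (i j : Int),
    gridBuild total parts base i j
      = (PySem.List.pyRange i j 1).map (gridBucket total parts base) := by
  intro i j
  induction hn : (j - i).toNat using Nat.strong_induction_on generalizing i j with
  | _ n ih =>
  by_cases h1 : j ≤ i
  · rw [gridBuild, dif_pos h1, PySem.List.pyRange_one_eq_nil h1, List.map_nil]
  · by_cases h2 : j - i = 1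
    · have hj : j = i + 1 := by omega
      rw [gridBuild, dif_neg h1, dif_pos h2, hj, PySem.List.pyRange_one_singleton]
      simp only [List.map_cons, List.map_nil, gridBucket]
    · have hm := gridMid_bounds i j (by omega)
      rw [gridBuild, dif_neg h1, dif_neg h2]
      rw [PySem.List.pyRange_one_append i (PySem.Int.floordiv (i + j) 2) j (by omega) (by omega),
          List.map_append]
      rw [ih ((PySem.Int.floordiv (i + j) 2) - i).toNat (by omega) i _ rfl,
          ih (j - (PySem.Int.floordiv (i + j) 2)).toNat (by omega) _ j rfl]

-- A's loop over indices s, …, s+m-1, none of which is the last index parts-1: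
-- each step moves start from k*base to (k+1)*base and appends (k*base, (k+1)*base).
theorem gridA_prefix (total parts base : Int) (m s : Nat)
    (h : (s : Int) + m ≤ parts - 1) (acc : List (Int × Int)) :
    ((List.range' s m).map (Nat.cast : Nat → Int)).foldl
      (fun (st : List (Int × Int) × Int) i =>
        let e := st.2 + base
        let e := if i = parts - 1 then total else e
        (st.1 ++ [(st.2, e)], e)) (acc, (s : Int) * base)
    = (acc ++ (List.range' s m).map (fun (k : Nat) => ((k : Int) * base, ((k : Int) + 1) * base)),
       ((s : Int) + m) * base) := by
  induction m generalizing s acc with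
  | zero => simp
  | succ m ih =>
    rw [List.range'_succ, List.map_cons, List.foldl_cons, List.map_cons]
    simp only
    have hne : ((s : Nat) : Int) ≠ parts - 1 := by push_cast at h ⊢; omega
    rw [if_neg hne]
    have h2 : ((s + 1 : Nat) : Int) + m ≤ parts - 1 := by push_cast at h ⊢; omega
    have := ih (s + 1) h2 (acc ++ [((s : Int) * base, (s : Int) * base + base)])
    have harg : ((s + 1 : Nat) : Int) * base = (s : Int) * base + base := by push_cast; ring
    rw [harg] at this
    rw [this]
    have hb : (s : Int) * base + base = ((s : Int) + 1) * base := by ring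
    rw [hb]
    push_cast
    refine Prod.ext ?_ (by simp only; ring)
    simp [List.append_assoc]

-- ===== VERDICT (by name: the statement is the Claim_ definition above) =====
theorem grid_bounds_py_spec : Claim_equal_grid_bounds_py := by
  intro total parts _ _
  unfold Spec_grid_bounds_py grid_bounds_py grid_bounds_py_alt
  simp only
  rw [gridBuild_eq_map]
  set base := PySem.Int.floordiv total parts with hbase
  by_cases hpos : 0 < parts
  · obtain ⟨n, hn⟩ : ∃ n : Nat, parts = (n : Int) + 1 := ⟨(parts - 1).toNat, by omega⟩
    subst hn
    rw [PySem.List.pyRange_one]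
    have hrange : ((n : Int) + 1 - 0).toNat = n + 1 := by omega
    rw [hrange]
    have hmapc : (List.range (n+1)).map (fun (k : Nat) => (0 : Int) + (k : Int))
        = (List.range' 0 (n+1)).map (Nat.cast : Nat → Int) := by
      simp [List.range_eq_range']
    rw [hmapc]
    -- A side: split the range at its last element and use the loop invariant
    rw [List.range'_1_concat, List.map_append, List.foldl_append]
    have hA := gridA_prefix total ((n : Int) + 1) base n 0 (by push_cast; omega) []
    simp only [Nat.cast_zero, zero_mul, zero_add, List.nil_append] at hA
    rw [hA]
    simp only [List.map_cons, List.map_nil, List.foldl_cons, List.foldl_nil]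
    rw [if_pos (by push_cast; ring)]
    -- B side: the bucket map splits the same way
    rw [List.map_append, List.map_map]
    congr 1
    · apply List.map_congr_left
      intro k hk
      have hk' : k < n := by
        have := List.mem_range'_1.mp hk; omega
      simp only [Function.comp_apply, gridBucket]
      rw [if_neg (by omega)]
    · simp only [List.map_cons, List.map_nil, gridBucket]
      rw [if_pos (by omega)]
      simp
  · have h1 : PySem.List.pyRange 0 parts 1 = [] :=
      PySem.List.pyRange_one_eq_nil (by omega)
    rw [h1]
    simp
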